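-- pv_equiv track=rewrite | github.com/kybaq/code-study | Week_2_배열/조은영/배열/나누어떨어지는숫자배열.py | solution
-- ===== SOURCE A (Python) =====
-- def solution(arr, divisor):
--
--     # 정답 담을 리스트
--     answer = []
--
--     # arr의 모든 원소에 대해 divisor로 나눠떨어지는지 보고 뒤에 붙임
--     for num in arr:
--         if num % divisor == 0:
--             answer.append(num)
--
--     # 없으면 [-1] 리턴
--     if not answer:
--         return [-1]
--
--     # 나누어 떨어지는 원소 있으면 오름차순 정렬 후 반환
--     answer.sort()
--     return answer
-- ===== SOURCE B (Python) =====
-- def solution(arr, divisor):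
--     # Count each divisible value (multiset as a dict), then emit sorted
--     # distinct keys expanded by multiplicity: sorting touches only the
--     # distinct divisible values instead of every element.
--     counts = {}
--     for num in arr:
--         if num % divisor == 0:
--             counts[num] = counts.get(num, 0) + 1
--     if not counts:
--         return [-1]
--     out = []
--     for k in sorted(counts):
--         out += [k] * counts[k]
--     return out
-- ===== Notes on version B (the rewrite author's own statement) =====
-- stated objective: alternative
-- what changed: B replaces A's filter-into-a-list-then-sort with a counting dict: one pass tallies the multiplicity of each divisible value, then the sorted distinct keys are expanded by their counts, so the sort touches only distinct values.
import Mathlib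
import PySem

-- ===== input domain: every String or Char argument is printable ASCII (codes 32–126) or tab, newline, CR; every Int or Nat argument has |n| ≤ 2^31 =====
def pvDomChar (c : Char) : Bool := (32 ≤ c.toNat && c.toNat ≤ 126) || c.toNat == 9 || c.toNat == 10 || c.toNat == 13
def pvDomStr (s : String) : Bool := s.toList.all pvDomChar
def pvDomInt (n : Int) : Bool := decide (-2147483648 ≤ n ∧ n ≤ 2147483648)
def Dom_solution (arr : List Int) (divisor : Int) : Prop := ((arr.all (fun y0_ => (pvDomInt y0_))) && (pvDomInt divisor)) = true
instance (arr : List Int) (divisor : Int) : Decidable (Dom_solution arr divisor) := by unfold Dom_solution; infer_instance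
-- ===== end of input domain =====

-- B counts divisible values in a dict and expands the sorted distinct keys by multiplicity, instead of A's filter-then-sort; return values proved equal for divisor ≠ 0.


-- ===== PORT A =====
def solution (arr : List Int) (divisor : Int) : List Int :=
  let answer := arr.foldl (fun acc num => if PySem.Int.mod num divisor = 0 then acc ++ [num] else acc) []
  if answer = [] then [-1]
  else PySem.List.sorted answer (fun x => x) false

-- ===== PORT B =====
def solution_alt (arr : List Int) (divisor : Int) : List Int :=
  let counts := arr.foldl
    (fun d num => if PySem.Int.mod num divisor = 0 then d.insert num (d.getD num 0 + 1) else d)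
    PySem.Dict.empty
  if counts.items = [] then [-1]
  else
    -- 'counts[k]' never raises here since k is drawn from counts' keys; ported as getD k 0
    (PySem.List.sorted counts.keys (fun x => x) false).foldl
      (fun out k => out ++ PySem.List.pyRepeat [k] (counts.getD k 0)) []

-- ===== PRECONDITION & SPEC =====
-- Pre_ excludes divisor = 0, on which Python's '%' raises ZeroDivisionError.
def Pre_solution (arr : List Int) (divisor : Int) : Prop := divisor ≠ 0
instance (arr : List Int) (divisor : Int) : Decidable (Pre_solution arr divisor) := by unfold Pre_solution; infer_instance
def pvWitness_solution : List Int × Int := ([5, 9, 7, 10], 5)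
def Spec_solution (arr : List Int) (divisor : Int) (out : List Int) : Prop := out = solution_alt arr divisor
instance (arr : List Int) (divisor : Int) (out : List Int) : Decidable (Spec_solution arr divisor out) := by unfold Spec_solution; infer_instance

-- ===== CLAIM (what is proved, stated in full; the proofs are below) =====
def Claim_equal_solution : Prop := ∀ (arr : List Int) (divisor : Int), Dom_solution arr divisor → Pre_solution arr divisor → Spec_solution arr divisor (solution arr divisor)

-- ===== LEMMAS AND PROOFS =====

-- Blocks of equal values over a strictly increasing key list are weakly increasing.
theorem pairwise_flatMap_replicate (ks : List Int) (c : Int → Nat)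
    (h : ks.Pairwise (· < ·)) :
    (ks.flatMap (fun k => List.replicate (c k) k)).Pairwise (· ≤ ·) := by
  induction ks with
  | nil => simp
  | cons k ks ih =>
    rw [List.pairwise_cons] at h
    rw [List.flatMap_cons, List.pairwise_append]
    refine ⟨List.pairwise_replicate.2 (Or.inr le_rfl), ih h.2, ?_⟩
    intro x hx y hy
    rcases List.eq_of_mem_replicate hx with rfl
    rcases List.mem_flatMap.1 hy with ⟨k', hk', hy'⟩
    have hlt := h.1 k' hk'
    rw [List.eq_of_mem_replicate hy']
    exact le_of_lt hlt

-- Counting elements of the expanded block list.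
theorem count_flatMap_replicate (ks : List Int) (c : Int → Nat) (v : Int)
    (hnd : ks.Nodup) :
    (ks.flatMap (fun k => List.replicate (c k) k)).count v
      = if v ∈ ks then c v else 0 := by
  induction ks with
  | nil => simp
  | cons k ks ih =>
    rw [List.flatMap_cons, List.count_append, ih hnd.of_cons]
    by_cases hv : v = k
    · subst hv
      have : v ∉ ks := (List.nodup_cons.1 hnd).1
      simp [this]
    · rw [List.count_eq_zero.2 (fun hm => hv (List.eq_of_mem_replicate hm))]
      simp [hv, List.mem_cons]

-- Expanding each distinct value of f by its multiplicity permutes f.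
theorem perm_flatMap_replicate_count (f ks : List Int)
    (hnd : ks.Nodup) (hmem : ∀ v, v ∈ ks ↔ v ∈ f) :
    (ks.flatMap (fun k => List.replicate (f.count k) k)).Perm f := by
  rw [List.perm_iff_count]
  intro v
  rw [count_flatMap_replicate ks (fun k => f.count k) v hnd]
  by_cases hv : v ∈ f
  · simp [(hmem v).2 hv]
  · have : v ∉ ks := fun h => hv ((hmem v).1 h)
    simp [this, List.count_eq_zero_of_not_mem hv]

-- sorted(f) equals the sorted distinct values of f expanded by multiplicity.
theorem sorted_eq_expand (f : List Int) :
    PySem.List.sorted f (fun x => x) false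
      = (PySem.List.sorted (PySem.Set.ofList f) (fun x => x) false).flatMap
          (fun k => List.replicate (f.count k) k) := by
  have hlt := PySem.List.sorted_ofList_pairwise_lt (xs := f)
  have hnd : (PySem.List.sorted (PySem.Set.ofList f) (fun x => x) false).Nodup :=
    hlt.imp (fun h => ne_of_lt h)
  have hmem : ∀ v, v ∈ PySem.List.sorted (PySem.Set.ofList f) (fun x => x) false ↔ v ∈ f := by
    intro v
    rw [PySem.List.mem_sorted, PySem.Set.mem_ofList]
  exact PySem.List.sorted_id_eq_of_perm_of_pairwise _ _
    (perm_flatMap_replicate_count f _ hnd hmem)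
    (pairwise_flatMap_replicate _ _ hlt)

-- ===== VERDICT (by name: the statement is the Claim_ definition above) =====
theorem solution_spec : Claim_equal_solution := by
  intro arr divisor _ _
  unfold Spec_solution solution solution_alt
  rw [PySem.List.foldl_append_ite_eq_filter, List.nil_append,
    PySem.List.foldl_ite_eq_foldl_filter,
    PySem.Dict.foldl_insert_getD_add_one_eq_counter]
  simp only [PySem.List.foldl_append_eq_flatMap, List.nil_append,
    PySem.Dict.items_counter, PySem.Dict.keys_counter,
    PySem.Dict.getD_counter, PySem.List.pyRepeat_singleton, Int.toNat_natCast]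
  set f := arr.filter (fun num => decide (PySem.Int.mod num divisor = 0)) with hf
  by_cases h : f = []
  · simp [h]
  · have hset : PySem.Set.ofList f ≠ [] := by
      intro hc
      rcases List.exists_mem_of_ne_nil f h with ⟨x, hx⟩
      have := (PySem.Set.mem_ofList f x).2 hx
      simp [hc] at this
    have hitems : (PySem.Set.ofList f).map (fun k => (k, (f.count k : Int))) ≠ [] := by
      simpa using hset
    rw [if_neg h, if_neg hitems, sorted_eq_expand f]
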